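-- pv_equiv track=rewrite | github.com/Stephen-HuYi/vscode | python/algorithm/hw3/nearest_point.py | candidateDot
-- ===== SOURCE A (Python) =====
-- def candidateDot(u, right, dis, med_x):
--     # 遍历right（已按横坐标升序排序）。若横坐标小于med_x-dis则进入下一次循环；若横坐标大于med_x+dis则跳出循环；若点的纵坐标好是否落在在[u[1]-dis,u[1]+dis]，则返回这个点
--     for v in right:
--         if v[0] < med_x-dis:
--             continue
--         if v[0] > med_x+dis:
--             break
--         if v[1] >= u[1]-dis and v[1] <= u[1]+dis:
--             yield v
-- ===== SOURCE B (Python) =====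
-- def candidateDot(u, right, dis, med_x):
--     # Two phases: locate the first point past the upper x bound, then
--     # filter that prefix with a single generator expression.
--     stop = len(right)
--     for i, v in enumerate(right):
--         if v[0] > med_x + dis:
--             stop = i
--             break
--     return (v for v in right[:stop]
--             if med_x - dis <= v[0] and u[1] - dis <= v[1] <= u[1] + dis)
-- ===== Notes on version B (the rewrite author's own statement) =====
-- stated objective: alternative
-- what changed: A's single loop with continue/break/yield is replaced by two phases: first locate the first point past the upper x bound, then filter that prefix with one generator expression; Pre_ excludes only inputs on which A raises IndexError.
import Mathlib
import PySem

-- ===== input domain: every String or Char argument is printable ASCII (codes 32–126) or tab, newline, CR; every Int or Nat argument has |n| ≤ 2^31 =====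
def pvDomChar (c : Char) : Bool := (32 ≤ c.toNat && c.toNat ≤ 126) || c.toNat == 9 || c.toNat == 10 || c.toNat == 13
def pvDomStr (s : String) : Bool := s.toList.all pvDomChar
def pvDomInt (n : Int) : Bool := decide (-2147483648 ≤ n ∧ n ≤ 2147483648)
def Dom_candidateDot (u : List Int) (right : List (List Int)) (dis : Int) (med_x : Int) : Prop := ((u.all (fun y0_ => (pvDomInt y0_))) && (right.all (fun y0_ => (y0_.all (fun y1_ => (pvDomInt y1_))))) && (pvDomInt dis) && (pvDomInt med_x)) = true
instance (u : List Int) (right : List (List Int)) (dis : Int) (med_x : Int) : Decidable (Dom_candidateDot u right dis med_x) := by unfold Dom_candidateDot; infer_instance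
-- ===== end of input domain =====

-- B replaces A's single loop with continue/break by two phases — find the first point past the upper x bound, then filter that prefix — same O(n) cost (objective: alternative).


-- ===== PORT A =====
-- A's for-loop with continue/break/yield, as structural recursion; the generator's
-- yielded values are collected into a list.  'none' from pyGet? = IndexError (excluded by Pre_).
def pvGoA (u : List Int) (dis med_x : Int) : List (List Int) → List (List Int)
  | [] => []
  | v :: rest =>
    match PySem.List.pyGet? v 0 with
    | none => []            -- IndexError (outside Pre_)
    | some x =>
      if x < med_x - dis then pvGoA u dis med_x rest       -- continue
      else if med_x + dis < x then []                      -- break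
      else
        match PySem.List.pyGet? v 1, PySem.List.pyGet? u 1 with
        | some y, some uy =>
          if uy - dis ≤ y ∧ y ≤ uy + dis then v :: pvGoA u dis med_x rest
          else pvGoA u dis med_x rest
        | _, _ => []        -- IndexError (outside Pre_)

def candidateDot (u : List Int) (right : List (List Int)) (dis : Int) (med_x : Int) : List (List Int) :=
  pvGoA u dis med_x right

-- ===== PORT B =====
-- phase 1 of Source B: number of points before the first one past the upper x bound
def pvStop (dis med_x : Int) : List (List Int) → Nat
  | [] => 0
  | v :: rest =>
    match PySem.List.pyGet? v 0 with
    | some x => if med_x + dis < x then 0 else pvStop dis med_x rest + 1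
    | none => 0             -- IndexError in Python (outside Pre_)

-- phase 2 of Source B: the generator-expression filter
def pvKeepB (u : List Int) (dis med_x : Int) (v : List Int) : Bool :=
  match PySem.List.pyGet? v 0, PySem.List.pyGet? u 1, PySem.List.pyGet? v 1 with
  | some x, some uy, some y =>
    decide (med_x - dis ≤ x) && decide (uy - dis ≤ y) && decide (y ≤ uy + dis)
  | _, _, _ => false        -- IndexError in Python (outside Pre_)

def candidateDot_alt (u : List Int) (right : List (List Int)) (dis : Int) (med_x : Int) : List (List Int) :=
  (right.take (pvStop dis med_x right)).filter (pvKeepB u dis med_x)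

-- ===== PRECONDITION & SPEC =====
-- helpers of Pre_: 'A's loop does not break at v' and 'the loop body raises no IndexError at v'
def pvContB (dis med_x : Int) (v : List Int) : Bool :=
  match PySem.List.pyGet? v 0 with
  | some x => !(decide (med_x - dis ≤ x) && decide (med_x + dis < x))
  | none => true
def pvOkB (u : List Int) (dis med_x : Int) (v : List Int) : Bool :=
  match PySem.List.pyGet? v 0 with
  | some x => decide (x < med_x - dis) || (decide (2 ≤ v.length) && decide (2 ≤ u.length))
  | none => false

-- Pre_ = exactly the inputs on which A returns (no IndexError): every point the loop
-- visits before breaking has an x-coordinate, and each one reaching the y-test has a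
-- y-coordinate and u has a second component.
def Pre_candidateDot (u : List Int) (right : List (List Int)) (dis : Int) (med_x : Int) : Prop :=
  (right.takeWhile (pvContB dis med_x)).all (pvOkB u dis med_x) = true
instance (u : List Int) (right : List (List Int)) (dis : Int) (med_x : Int) : Decidable (Pre_candidateDot u right dis med_x) := by unfold Pre_candidateDot; infer_instance

def pvWitness_candidateDot : List Int × List (List Int) × Int × Int := ([0, 0], [[0, 0], [3, 1]], 1, 0)

def Spec_candidateDot (u : List Int) (right : List (List Int)) (dis : Int) (med_x : Int) (out : List (List Int)) : Prop := out = candidateDot_alt u right dis med_x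
instance (u : List Int) (right : List (List Int)) (dis : Int) (med_x : Int) (out : List (List Int)) : Decidable (Spec_candidateDot u right dis med_x out) := by unfold Spec_candidateDot; infer_instance

-- ===== CLAIM (what is proved, stated in full; the proofs are below) =====
def Claim_equal_candidateDot : Prop := ∀ (u : List Int) (right : List (List Int)) (dis : Int) (med_x : Int), Dom_candidateDot u right dis med_x → Pre_candidateDot u right dis med_x → Spec_candidateDot u right dis med_x (candidateDot u right dis med_x)

-- ===== LEMMAS AND PROOFS =====
-- with a negative radius the x-band and the y-band are both empty, so A yields nothing
theorem pvGoA_neg (u : List Int) (dis med_x : Int) (hneg : dis < 0) :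
    ∀ right : List (List Int), pvGoA u dis med_x right = []
  | [] => rfl
  | v :: rest => by
    unfold pvGoA
    cases hx : PySem.List.pyGet? v 0 with
    | none => rfl
    | some x =>
      by_cases hlo : x < med_x - dis
      · simp [hlo, pvGoA_neg u dis med_x hneg rest]
      · have hhi : med_x + dis < x := by omega
        simp [hlo, hhi]

-- with a negative radius the y-band is empty, so B's filter keeps nothing
theorem pvKeepB_neg (u : List Int) (dis med_x : Int) (hneg : dis < 0) (v : List Int) :
    pvKeepB u dis med_x v = false := by
  unfold pvKeepB
  cases PySem.List.pyGet? v 0 with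
  | none => rfl
  | some x =>
    cases PySem.List.pyGet? u 1 with
    | none => rfl
    | some uy =>
      cases PySem.List.pyGet? v 1 with
      | none => rfl
      | some y =>
        by_cases h1 : uy - dis ≤ y
        · have h2 : ¬ y ≤ uy + dis := by omega
          simp [h2]
        · simp [h1]

-- main equality for a non-negative radius: both sides walk the same prefix
theorem pvMainNN (u : List Int) (dis med_x : Int) (hnn : 0 ≤ dis) :
    ∀ right : List (List Int),
      (right.takeWhile (pvContB dis med_x)).all (pvOkB u dis med_x) = true →
      pvGoA u dis med_x right = (right.take (pvStop dis med_x right)).filter (pvKeepB u dis med_x)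
  | [], _ => rfl
  | v :: rest, h => by
    by_cases hc : pvContB dis med_x v = true
    · -- the loop does not break at v
      rw [List.takeWhile_cons_of_pos hc, List.all_cons, Bool.and_eq_true] at h
      obtain ⟨hok, hrest⟩ := h
      have ih := pvMainNN u dis med_x hnn rest hrest
      unfold pvOkB at hok
      unfold pvContB at hc
      unfold pvGoA pvStop
      cases hx : PySem.List.pyGet? v 0 with
      | none => simp [hx] at hok
      | some x =>
        rw [hx] at hok hc
        have hnb : ¬ (med_x + dis < x) := by
          intro h'
          have : med_x - dis ≤ x := by omega
          simp [this, h'] at hc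
        simp only [hnb, if_false, List.take_succ_cons, List.filter_cons]
        by_cases hlo : x < med_x - dis
        · have hkeep : pvKeepB u dis med_x v = false := by
            unfold pvKeepB; rw [hx]
            cases PySem.List.pyGet? u 1 <;> cases PySem.List.pyGet? v 1 <;> simp <;> omega
          simp [hlo, hkeep, ih]
        · have hlen : 2 ≤ v.length ∧ 2 ≤ u.length := by
            rcases Bool.or_eq_true _ _ |>.mp hok with h' | h'
            · exact absurd (of_decide_eq_true h') hlo
            · exact ⟨of_decide_eq_true (Bool.and_eq_true _ _ |>.mp h').1,
                     of_decide_eq_true (Bool.and_eq_true _ _ |>.mp h').2⟩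
          have h1v : (1:Nat) < v.length := by omega
          have h1u : (1:Nat) < u.length := by omega
          have hy : PySem.List.pyGet? v 1 = some v[1] := PySem.List.pyGet?_ofNat v 1 h1v
          have huy : PySem.List.pyGet? u 1 = some u[1] := PySem.List.pyGet?_ofNat u 1 h1u
          have hkeep : pvKeepB u dis med_x v =
              (decide (med_x - dis ≤ x) && decide (u[1] - dis ≤ v[1]) && decide (v[1] ≤ u[1] + dis)) := by
            unfold pvKeepB; rw [hx, hy, huy]
          simp only [hlo, if_false, hy, huy]
          by_cases hband : u[1] - dis ≤ v[1] ∧ v[1] ≤ u[1] + dis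
          · have hk : pvKeepB u dis med_x v = true := by
              rw [hkeep]; simp [hband.1, hband.2]; omega
            simp [hband, hk, ih]
          · have hk : pvKeepB u dis med_x v = false := by
              rw [hkeep]
              rcases not_and_or.mp hband with h' | h' <;> simp [h']
            rw [if_neg hband, hk]; simp [ih]
    · -- the loop breaks at v: both sides stop here
      have hc' := hc
      unfold pvContB at hc'
      unfold pvGoA pvStop
      cases hx : PySem.List.pyGet? v 0 with
      | none => simp [hx] at hc'
      | some x =>
        rw [hx] at hc'
        have hstop : med_x - dis ≤ x ∧ med_x + dis < x := by
          by_contra h'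
          apply hc'
          simp only [Bool.not_eq_true', Bool.and_eq_false_iff, decide_eq_false_iff_not] at *
          tauto
        have hlo : ¬ x < med_x - dis := by omega
        simp [hstop, hlo]

-- ===== VERDICT (by name: the statement is the Claim_ definition above) =====
theorem candidateDot_spec : Claim_equal_candidateDot := by
  intro u right dis med_x _ hpre
  rcases lt_or_ge dis 0 with hneg | hnn
  · show pvGoA u dis med_x right = _
    rw [pvGoA_neg u dis med_x hneg right]
    unfold candidateDot_alt
    rw [List.filter_eq_nil_iff.mpr (fun v _ => by simp [pvKeepB_neg u dis med_x hneg v])]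
  · exact pvMainNN u dis med_x hnn right hpre
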